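-- pv_equiv track=rewrite | github.com/davidhacking/diff | algo.py | getExtraCellDiff
-- ===== SOURCE A (Python) =====
-- def getExtraCellDiff(a, b):
-- 	extraCellDiff = []
-- 	am, bm = len(a), len(b)
-- 	an = 0 if am <= 0 else len(a[0])
-- 	bn = 0 if bm <= 0 else len(b[0])
--
-- 	if am < bm or an < bn:
-- 		for i in range(len(b)):
-- 			for j in range(len(b[0])):
-- 				if b[i][j] is not None and b[i][j] != '' and (i >= am or j >= an):
-- 					extraCellDiff.append([[i, j], [i, j]])
-- 	if bm < am or bn < an:
-- 		for i in range(len(a)):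
-- 			for j in range(len(a[0])):
-- 				if a[i][j] is not None and a[i][j] != '' and (i >= bm or j >= bn):
-- 					extraCellDiff.append([[i, j], [i, j]])
-- 	return extraCellDiff
-- ===== SOURCE B (Python) =====
-- def getExtraCellDiff(a, b):
--     am, bm = len(a), len(b)
--     an = len(a[0]) if a else 0
--     bn = len(b[0]) if b else 0
--     res = []
--     # walk b's rows; in a shared row only the extra-column slice, in an extra row the whole row
--     for i, row in enumerate(b):
--         lo = an if i < am else 0
--         for off, c in enumerate(row[lo:bn]):
--             if c is not None and c != '':
--                 res.append([[i, lo + off], [i, lo + off]])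
--     # walk a's rows the same way against b's bounds
--     for i, row in enumerate(a):
--         lo = bn if i < bm else 0
--         for off, c in enumerate(row[lo:an]):
--             if c is not None and c != '':
--                 res.append([[i, lo + off], [i, lo + off]])
--     return res
-- ===== Notes on version B (the rewrite author's own statement) =====
-- stated objective: alternative
-- what changed: A runs guarded index loops over every cell of the larger matrix and tests (i >= am or j >= an) per cell; B instead walks the rows themselves with enumerate and slices each row to its out-of-overlap part (row[lo:bn]), so no per-cell position test and no whole-matrix scan remain.
import Mathlib
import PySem

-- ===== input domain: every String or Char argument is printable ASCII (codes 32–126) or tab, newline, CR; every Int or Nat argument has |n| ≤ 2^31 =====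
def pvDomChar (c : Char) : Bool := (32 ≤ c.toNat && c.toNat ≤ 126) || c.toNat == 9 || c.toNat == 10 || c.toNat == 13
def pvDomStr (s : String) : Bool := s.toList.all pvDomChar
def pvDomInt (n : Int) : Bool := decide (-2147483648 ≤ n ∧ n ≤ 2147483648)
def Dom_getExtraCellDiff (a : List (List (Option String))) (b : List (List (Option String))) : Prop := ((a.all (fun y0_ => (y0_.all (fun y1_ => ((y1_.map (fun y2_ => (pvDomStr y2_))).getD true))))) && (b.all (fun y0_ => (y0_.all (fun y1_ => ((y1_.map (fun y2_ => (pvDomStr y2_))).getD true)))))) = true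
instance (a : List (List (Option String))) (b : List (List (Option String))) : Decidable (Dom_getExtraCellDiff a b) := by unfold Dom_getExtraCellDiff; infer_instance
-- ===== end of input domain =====

-- B walks the rows themselves with enumerate and slices each row to its out-of-overlap part,
-- instead of A's guarded full index scans with a per-cell position test (objective: alternative).

-- ===== PORT A =====
-- cell test of A: `m[i][j] is not None and m[i][j] != ''`; a pyGet? `none`
-- is an IndexError in Python, and such inputs are excluded by Pre_.
def pvCellNE (m : List (List (Option String))) (i j : Int) : Bool :=
  match PySem.List.pyGet? m i with
  | none => false
  | some row =>
    match PySem.List.pyGet? row j with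
    | none => false
    | some none => false
    | some (some s) => decide (s ≠ "")

-- literal port of A; the inner bound `len(b[0])` equals bn (resp. `len(a[0])` = an)
-- whenever the loop body runs (the guard forces the matrix nonempty), so bn/an is used.
def getExtraCellDiff (a : List (List (Option String))) (b : List (List (Option String))) : List (List (List Int)) :=
  let am : Int := a.length
  let bm : Int := b.length
  let an : Int := if am ≤ 0 then 0 else (a.headI.length : Int)
  let bn : Int := if bm ≤ 0 then 0 else (b.headI.length : Int)
  let acc : List (List (List Int)) := []
  let acc :=
    if am < bm ∨ an < bn then
      (PySem.List.pyRange 0 bm 1).foldl (fun acc i =>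
        (PySem.List.pyRange 0 bn 1).foldl (fun acc j =>
          if pvCellNE b i j && (decide (am ≤ i) || decide (an ≤ j)) then
            acc ++ [[[i, j], [i, j]]]
          else acc) acc) acc
    else acc
  let acc :=
    if bm < am ∨ bn < an then
      (PySem.List.pyRange 0 am 1).foldl (fun acc i =>
        (PySem.List.pyRange 0 an 1).foldl (fun acc j =>
          if pvCellNE a i j && (decide (bm ≤ i) || decide (bn ≤ j)) then
            acc ++ [[[i, j], [i, j]]]
          else acc) acc) acc
    else acc
  acc

-- ===== PORT B =====
-- B's cell test `c is not None and c != ''` applied to the cell VALUE itself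
def pvVal : Option String → Bool
  | none => false
  | some s => decide (s ≠ "")

-- B's inner loop: `for off, c in enumerate(row[lo:hi]): …` appending at column lo+off
def pvScanRow (i lo hi : Int) (row : List (Option String))
    (acc : List (List (List Int))) : List (List (List Int)) :=
  (PySem.List.enumerate (PySem.List.slice row (some lo) (some hi)) 0).foldl
    (fun acc q =>
      if pvVal q.2 then acc ++ [[[i, lo + q.1], [i, lo + q.1]]] else acc) acc

-- one phase of B: `for i, row in enumerate(m): lo = n if i < ov else 0; scan row[lo:hi]`
def pvPhaseAlt (m : List (List (Option String))) (ov n hi : Int)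
    (init : List (List (List Int))) : List (List (List Int)) :=
  (PySem.List.enumerate m 0).foldl
    (fun acc p => pvScanRow p.1 (if p.1 < ov then n else 0) hi p.2 acc) init

def getExtraCellDiff_alt (a : List (List (Option String))) (b : List (List (Option String))) : List (List (List Int)) :=
  let am : Int := a.length
  let bm : Int := b.length
  let an : Int := if a.isEmpty then 0 else (a.headI.length : Int)
  let bn : Int := if b.isEmpty then 0 else (b.headI.length : Int)
  pvPhaseAlt a bm bn an (pvPhaseAlt b am an bn [])

-- ===== PRECONDITION & SPEC =====
-- Pre_ excludes exactly the inputs on which the Python A raises IndexError: whenever a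
-- phase's loops run, every row of the scanned matrix must be at least as long as its first row.
def Pre_getExtraCellDiff (a : List (List (Option String))) (b : List (List (Option String))) : Prop :=
  ((a.length < b.length ∨ a.headI.length < b.headI.length) →
      ∀ row ∈ b, b.headI.length ≤ row.length) ∧
  ((b.length < a.length ∨ b.headI.length < a.headI.length) →
      ∀ row ∈ a, a.headI.length ≤ row.length)

instance (a : List (List (Option String))) (b : List (List (Option String))) : Decidable (Pre_getExtraCellDiff a b) := by unfold Pre_getExtraCellDiff; infer_instance

def pvWitness_getExtraCellDiff : List (List (Option String)) × List (List (Option String)) :=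
  ([[some "x"]], [[some "x", some "y"]])

def Spec_getExtraCellDiff (a : List (List (Option String))) (b : List (List (Option String))) (out : List (List (List Int))) : Prop := out = getExtraCellDiff_alt a b
instance (a : List (List (Option String))) (b : List (List (Option String))) (out : List (List (List Int))) : Decidable (Spec_getExtraCellDiff a b out) := by unfold Spec_getExtraCellDiff; infer_instance

-- ===== CLAIM (what is proved, stated in full; the proofs are below) =====
def Claim_equal_getExtraCellDiff : Prop := ∀ (a : List (List (Option String))) (b : List (List (Option String))), Dom_getExtraCellDiff a b → Pre_getExtraCellDiff a b → Spec_getExtraCellDiff a b (getExtraCellDiff a b)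

-- ===== LEMMAS AND PROOFS =====

theorem pvFoldlId {α β : Type} (l : List α) (init : β) :
    l.foldl (fun acc _ => acc) init = init := by
  induction l generalizing init with
  | nil => rfl
  | cons x t ih => exact ih init

-- one row of an A-phase: scanning j ∈ [0, C) with the `i ≥ M or j ≥ N` test equals
-- scanning only j ∈ [N, C) (resp. all of [0, C) for an extra row) without it.
theorem pvRow (m : List (List (Option String))) (M N C i : Int) (hN : 0 ≤ N)
    (acc : List (List (List Int))) :
    (PySem.List.pyRange 0 C 1).foldl (fun acc j =>
        if pvCellNE m i j && (decide (M ≤ i) || decide (N ≤ j)) then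
          acc ++ [[[i, j], [i, j]]] else acc) acc
    = (PySem.List.pyRange (if i < M then N else 0) C 1).foldl (fun acc j =>
        if pvCellNE m i j then acc ++ [[[i, j], [i, j]]] else acc) acc := by
  by_cases hM : i < M
  · have hMle : decide (M ≤ i) = false := by simp; omega
    simp only [if_pos hM, hMle, Bool.false_or]
    rw [PySem.List.foldl_append_if, PySem.List.foldl_append_if]
    by_cases hNC : N ≤ C
    · rw [PySem.List.pyRange_one_append 0 N C hN hNC, List.filter_append]
      have h1 : (PySem.List.pyRange 0 N 1).filter
          (fun j => pvCellNE m i j && decide (N ≤ j)) = [] := by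
        rw [List.filter_eq_nil_iff]
        intro j hj
        have := (PySem.List.mem_pyRange_one).1 hj
        simp
        omega
      have h2 : (PySem.List.pyRange N C 1).filter
          (fun j => pvCellNE m i j && decide (N ≤ j))
          = (PySem.List.pyRange N C 1).filter (fun j => pvCellNE m i j) := by
        apply List.filter_congr
        intro j hj
        have := (PySem.List.mem_pyRange_one).1 hj
        simp
        omega
      rw [h1, h2]
      simp
    · have h0 : PySem.List.pyRange N C 1 = [] :=
        PySem.List.pyRange_one_eq_nil (by omega)
      have h1 : (PySem.List.pyRange 0 C 1).filter
          (fun j => pvCellNE m i j && decide (N ≤ j)) = [] := by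
        rw [List.filter_eq_nil_iff]
        intro j hj
        have := (PySem.List.mem_pyRange_one).1 hj
        simp
        omega
      rw [h0, h1]
      simp
  · have hMle : decide (M ≤ i) = true := by simp; omega
    simp [if_neg hM, hMle]

-- a whole guarded phase of A equals the border-only normal form
theorem pvPhase (m : List (List (Option String))) (M N R C : Int) (hN : 0 ≤ N)
    (init : List (List (List Int))) :
    (if M < R ∨ N < C then
      (PySem.List.pyRange 0 R 1).foldl (fun acc i =>
        (PySem.List.pyRange 0 C 1).foldl (fun acc j =>
          if pvCellNE m i j && (decide (M ≤ i) || decide (N ≤ j)) then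
            acc ++ [[[i, j], [i, j]]] else acc) acc) init
     else init)
    = (PySem.List.pyRange 0 R 1).foldl (fun acc i =>
        (PySem.List.pyRange (if i < M then N else 0) C 1).foldl (fun acc j =>
          if pvCellNE m i j then acc ++ [[[i, j], [i, j]]] else acc) acc) init := by
  by_cases hg : M < R ∨ N < C
  · rw [if_pos hg]
    apply PySem.List.foldl_congr_mem
    intro acc i _
    exact pvRow m M N C i hN acc
  · rw [if_neg hg]
    rw [not_or, not_lt, not_lt] at hg
    rw [PySem.List.foldl_congr_mem (g := fun acc _ => acc), pvFoldlId]
    intro acc i hi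
    have hiR := (PySem.List.mem_pyRange_one).1 hi
    have hiM : i < M := by omega
    have : PySem.List.pyRange (if i < M then N else 0) C 1 = [] := by
      rw [if_pos hiM]
      exact PySem.List.pyRange_one_eq_nil (by omega)
    rw [this]
    rfl

-- a fold over `enumerate xs st` is a fold over the index range with a lookup
theorem pvEnumBridge {α : Type} (xs : List α) (st : Int)
    (F : List (List (List Int)) → Int → α → List (List (List Int)))
    (acc : List (List (List Int))) :
    (PySem.List.enumerate xs st).foldl (fun acc q => F acc q.1 q.2) acc
    = (PySem.List.pyRange st (st + xs.length) 1).foldl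
        (fun acc j => match PySem.List.pyGet? xs (j - st) with
          | some x => F acc j x
          | none => acc) acc := by
  induction xs generalizing st acc with
  | nil =>
    rw [PySem.List.enumerate_nil, PySem.List.pyRange_one_eq_nil (by simp)]
    rfl
  | cons x t ih =>
    rw [PySem.List.enumerate_cons]
    have hlt : st < st + ((x :: t).length : Int) := by simp
    rw [PySem.List.pyRange_one_cons hlt]
    simp only [List.foldl_cons]
    have hhead : PySem.List.pyGet? (x :: t) (st - st) = some x := by
      have h0 : st - st = ((0 : Nat) : Int) := by omega
      rw [h0, PySem.List.pyGet?_natCast]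
      rfl
    rw [hhead, ih (st + 1)]
    have hb : st + ((x :: t).length : Int) = (st + 1) + (t.length : Int) := by
      simp; omega
    rw [hb]
    apply PySem.List.foldl_congr_mem
    intro acc' j hj
    have hjr := (PySem.List.mem_pyRange_one).1 hj
    have h1 : j - st = (((j - st).toNat : Nat) : Int) := by omega
    have h2 : j - (st + 1) = (((j - st).toNat - 1 : Nat) : Int) := by omega
    have h3 : (j - st).toNat = ((j - st).toNat - 1) + 1 := by omega
    rw [h1, h2, PySem.List.pyGet?_natCast, PySem.List.pyGet?_natCast, h3,
      List.getElem?_cons_succ]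
    simp

-- a range shifted by lo
theorem pvRangeShift (lo L : Int) (G : List (List (List Int)) → Int → List (List (List Int)))
    (acc : List (List (List Int))) :
    (PySem.List.pyRange 0 L 1).foldl (fun acc k => G acc (lo + k)) acc
    = (PySem.List.pyRange lo (lo + L) 1).foldl G acc := by
  rw [PySem.List.pyRange_one 0 L, PySem.List.pyRange_one lo (lo + L)]
  simp [List.foldl_map]

-- B's row scan equals the border-only inner fold of the normal form
theorem pvScanRowEq (m : List (List (Option String))) (row : List (Option String))
    (i lo hi : Int) (hrow : PySem.List.pyGet? m i = some row) (hlo : 0 ≤ lo) (hhi : 0 ≤ hi)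
    (hlen : hi ≤ (row.length : Int) ∨ hi ≤ lo) (acc : List (List (List Int))) :
    pvScanRow i lo hi row acc
    = (PySem.List.pyRange lo hi 1).foldl
        (fun acc j => if pvCellNE m i j then acc ++ [[[i, j], [i, j]]] else acc) acc := by
  unfold pvScanRow
  refine Eq.trans (pvEnumBridge (PySem.List.slice row (some lo) (some hi)) 0
    (fun acc k c => if pvVal c then acc ++ [[[i, lo + k], [i, lo + k]]] else acc) acc) ?_
  rw [PySem.List.slice_toNat row (a := lo) (b := hi) hlo hhi]
  by_cases hc : hi ≤ lo
  · have h0 : hi.toNat - lo.toNat = 0 := by omega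
    rw [h0]
    rw [PySem.List.pyRange_one_eq_nil (by simp), PySem.List.pyRange_one_eq_nil (by omega)]
    rfl
  · have hwl : hi ≤ (row.length : Int) := by omega
    have hlsub : ((List.drop lo.toNat row).take (hi.toNat - lo.toNat)).length
        = hi.toNat - lo.toNat := by
      simp [List.length_take, List.length_drop]
      omega
    have hL : (0 : Int) + (((List.drop lo.toNat row).take (hi.toNat - lo.toNat)).length : Int)
        = hi - lo := by
      rw [hlsub]; omega
    rw [hL]
    refine Eq.trans (PySem.List.foldl_congr_mem _ _
      (fun acc' k => if pvCellNE m i (lo + k) then acc' ++ [[[i, lo + k], [i, lo + k]]] else acc')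
      acc ?_) ?_
    · intro acc' k hk
      have hkr := (PySem.List.mem_pyRange_one).1 hk
      have hidx : lo.toNat + k.toNat < row.length := by omega
      have hk0 : k - 0 = ((k.toNat : Nat) : Int) := by omega
      have hsub : PySem.List.pyGet? ((List.drop lo.toNat row).take (hi.toNat - lo.toNat))
          ((k.toNat : Nat) : Int) = some row[lo.toNat + k.toNat] := by
        rw [PySem.List.pyGet?_natCast]
        rw [List.getElem?_take_of_lt (by omega), List.getElem?_drop]
        exact List.getElem?_eq_getElem hidx
      have hgr : PySem.List.pyGet? row (lo + k) = some row[lo.toNat + k.toNat] := by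
        have hlk : lo + k = ((lo.toNat + k.toNat : Nat) : Int) := by omega
        rw [hlk, PySem.List.pyGet?_natCast]
        exact List.getElem?_eq_getElem hidx
      have hcell : pvCellNE m i (lo + k) = pvVal row[lo.toNat + k.toNat] := by
        cases hv : row[lo.toNat + k.toNat] <;>
          simp [pvCellNE, hrow, hgr, hv, pvVal]
      rw [hk0, hsub]
      simp only [hcell]
    · have hsh := pvRangeShift lo (hi - lo)
        (fun acc' j => if pvCellNE m i j then acc' ++ [[[i, j], [i, j]]] else acc') acc
      rw [show lo + (hi - lo) = hi from by omega] at hsh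
      exact hsh

-- a whole phase of B equals the border-only normal form
theorem pvPhaseAltEq (m : List (List (Option String))) (ov n hi : Int)
    (hn : 0 ≤ n) (hhi : 0 ≤ hi)
    (hlen : (ov < (m.length : Int) ∨ n < hi) → ∀ row ∈ m, hi ≤ (row.length : Int))
    (init : List (List (List Int))) :
    pvPhaseAlt m ov n hi init
    = (PySem.List.pyRange 0 (m.length : Int) 1).foldl (fun acc i =>
        (PySem.List.pyRange (if i < ov then n else 0) hi 1).foldl
          (fun acc j => if pvCellNE m i j then acc ++ [[[i, j], [i, j]]] else acc) acc) init := by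
  unfold pvPhaseAlt
  refine Eq.trans (pvEnumBridge m 0
    (fun acc i row => pvScanRow i (if i < ov then n else 0) hi row acc) init) ?_
  have h0 : (0 : Int) + (m.length : Int) = (m.length : Int) := by omega
  rw [h0]
  apply PySem.List.foldl_congr_mem
  intro acc i hi_mem
  have hir := (PySem.List.mem_pyRange_one).1 hi_mem
  have hit : i.toNat < m.length := by omega
  have hrow : PySem.List.pyGet? m (i - 0) = some m[i.toNat] := by
    have : i - 0 = ((i.toNat : Nat) : Int) := by omega
    rw [this, PySem.List.pyGet?_natCast]
    exact List.getElem?_eq_getElem hit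
  rw [hrow]
  rw [sub_zero] at hrow
  refine pvScanRowEq m m[i.toNat] i _ hi hrow (by split <;> omega) hhi ?_ acc
  by_cases hg : ov < (m.length : Int) ∨ n < hi
  · exact Or.inl (hlen hg m[i.toNat] (List.getElem_mem hit))
  · rw [not_or, not_lt, not_lt] at hg
    have : i < ov := by omega
    rw [if_pos this]
    exact Or.inr hg.2

theorem pvLenIfA (x : List (List (Option String))) :
    (if (x.length : Int) ≤ 0 then (0 : Int) else (x.headI.length : Int))
    = (x.headI.length : Int) := by
  cases x with
  | nil => simp
  | cons h t => simp

theorem pvLenIfB (x : List (List (Option String))) :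
    (if x.isEmpty then (0 : Int) else (x.headI.length : Int))
    = (x.headI.length : Int) := by
  cases x with
  | nil => simp
  | cons h t => simp

-- ===== VERDICT (by name: the statement is the Claim_ definition above) =====
theorem getExtraCellDiff_spec : Claim_equal_getExtraCellDiff := by
  intro a b _ hpre
  show getExtraCellDiff a b = getExtraCellDiff_alt a b
  unfold getExtraCellDiff getExtraCellDiff_alt
  simp only [pvLenIfA, pvLenIfB]
  rw [pvPhase b _ _ _ _ (by simp), pvPhase a _ _ _ _ (by simp)]
  rw [pvPhaseAltEq b _ _ _ (by simp) (by simp)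
      (fun hg row hrow => by exact_mod_cast hpre.1 (by exact_mod_cast hg) row hrow),
    pvPhaseAltEq a _ _ _ (by simp) (by simp)
      (fun hg row hrow => by exact_mod_cast hpre.2 (by exact_mod_cast hg) row hrow)]
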